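-- pv_equiv track=rewrite | github.com/vivzz2216/face2phase | backend/analysis/speech/pronunciation_analyzer.py | get_stress_pattern
-- ===== SOURCE A (Python) =====
-- from typing import Dict, List, Optional
--
-- def get_stress_pattern(pronunciation: List[str]) -> tuple:
--     """
--     Extract stress pattern from pronunciation
--
--     Args:
--         pronunciation: List of phonemes from CMU dictionary
--
--     Returns:
--         Tuple of (primary_stress_index, secondary_stress_indices, syllables)
--     """
--     primary_stress = None
--     secondary_stresses = []
--     syllables = []
--     current_syllable = []
--
--     for phoneme in pronunciation:
--         # Check for stress markers (0=no stress, 1=primary, 2=secondary)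
--         if phoneme.endswith('1'):
--             primary_stress = len(syllables)
--             current_syllable.append(phoneme.rstrip('1'))
--             syllables.append(current_syllable)
--             current_syllable = []
--         elif phoneme.endswith('2'):
--             secondary_stresses.append(len(syllables))
--             current_syllable.append(phoneme.rstrip('2'))
--             syllables.append(current_syllable)
--             current_syllable = []
--         elif phoneme.endswith('0'):
--             current_syllable.append(phoneme.rstrip('0'))
--             syllables.append(current_syllable)
--             current_syllable = []
--         else:
--             current_syllable.append(phoneme)
--
--     if current_syllable:
--         syllables.append(current_syllable)
--
--     return primary_stress, secondary_stresses, syllables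
-- ===== SOURCE B (Python) =====
-- def _mark(phoneme):
--     """Return the trailing stress digit of the phoneme, or None."""
--     if phoneme and phoneme[-1] in '012':
--         return phoneme[-1]
--     return None
--
--
-- def get_stress_pattern(pronunciation):
--     """
--     Extract stress pattern from pronunciation.
--
--     Back-to-front decomposition: walk the phonemes in reverse, building the
--     syllables right-to-left (each collected reversed) and recording stress
--     positions counted from the right; one fix-up at the end reverses
--     everything and converts right-based positions to syllable indices.
--     """
--     rsyls = []     # syllables right-to-left, each syllable's phonemes reversed
--     prim_r = None  # right-based syllable position of the rightmost '1'
--     sec_r = []     # right-based positions of '2' markers, right-to-left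
--     for p in reversed(pronunciation):
--         m = _mark(p)
--         if m is not None:
--             if m == '1' and prim_r is None:
--                 prim_r = len(rsyls)
--             elif m == '2':
--                 sec_r.append(len(rsyls))
--             rsyls.append([p.rstrip(m)])
--         elif rsyls:
--             rsyls[-1].append(p)
--         else:
--             rsyls.append([p])
--     n = len(rsyls)
--     prim = None if prim_r is None else n - 1 - prim_r
--     sec = [n - 1 - k for k in reversed(sec_r)]
--     syllables = [list(reversed(s)) for s in reversed(rsyls)]
--     return prim, sec, syllables
-- ===== Notes on version B (the rewrite author's own statement) =====
-- stated objective: alternative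
-- what changed: Replaces A's forward accumulating loop (open current_syllable buffer, stress indices read off len(syllables) as it grows, trailing buffer flushed after the loop) by a reverse pass that builds the syllables right-to-left (each collected reversed) with stress positions counted from the right, converting positions and reversing everything in one final fix-up; no open-buffer flush step.
import Mathlib
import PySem

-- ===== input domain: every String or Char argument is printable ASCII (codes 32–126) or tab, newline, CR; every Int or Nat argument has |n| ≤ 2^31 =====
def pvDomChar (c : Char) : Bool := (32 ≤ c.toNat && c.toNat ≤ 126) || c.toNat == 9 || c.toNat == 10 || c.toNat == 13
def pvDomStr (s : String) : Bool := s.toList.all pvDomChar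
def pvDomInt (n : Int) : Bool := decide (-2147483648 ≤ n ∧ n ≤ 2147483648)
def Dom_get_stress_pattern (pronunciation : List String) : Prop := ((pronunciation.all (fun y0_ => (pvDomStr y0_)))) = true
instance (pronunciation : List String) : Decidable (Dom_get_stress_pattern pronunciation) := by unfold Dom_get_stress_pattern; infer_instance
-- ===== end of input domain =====

-- B replaces A's forward accumulating loop by a reverse pass that builds the syllables
-- right-to-left with right-based stress positions and one final fix-up (objective: alternative).

-- shared primitive: Python s.rstrip(c) for a single character c (exact: drops every trailing occurrence of c)
def pyRstripChar (s : String) (c : Char) : String :=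
  String.ofList ((s.toList.reverse.dropWhile (fun d => d == c)).reverse)

-- ===== PORT A =====
def stepA_gsp (st : Option Int × List Int × List (List String) × List String)
    (phoneme : String) : Option Int × List Int × List (List String) × List String :=
  match st with
  | (primary_stress, secondary_stresses, syllables, current_syllable) =>
    if PySem.Str.endswith phoneme "1" then
      (some (syllables.length : Int), secondary_stresses,
       syllables ++ [current_syllable ++ [pyRstripChar phoneme '1']], [])
    else if PySem.Str.endswith phoneme "2" then
      (primary_stress, secondary_stresses ++ [(syllables.length : Int)],
       syllables ++ [current_syllable ++ [pyRstripChar phoneme '2']], [])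
    else if PySem.Str.endswith phoneme "0" then
      (primary_stress, secondary_stresses,
       syllables ++ [current_syllable ++ [pyRstripChar phoneme '0']], [])
    else
      (primary_stress, secondary_stresses, syllables, current_syllable ++ [phoneme])

def get_stress_pattern (pronunciation : List String) : Option Int × List Int × List (List String) :=
  match pronunciation.foldl stepA_gsp (none, [], [], []) with
  | (primary_stress, secondary_stresses, syllables, current_syllable) =>
    (primary_stress, secondary_stresses,
     if current_syllable ≠ [] then syllables ++ [current_syllable] else syllables)

-- ===== PORT B =====
-- helper _mark: the trailing stress digit of the phoneme, or none
def markB (phoneme : String) : Option Char :=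
  match phoneme.toList.getLast? with
  | some c => if c = '0' ∨ c = '1' ∨ c = '2' then some c else none
  | none => none

-- loop body of B: state (rsyls, prim_r, sec_r)
def stepB_gsp (st : List (List String) × Option Int × List Int)
    (p : String) : List (List String) × Option Int × List Int :=
  match st with
  | (rsyls, prim_r, sec_r) =>
    match markB p with
    | some m =>
      if m = '1' ∧ prim_r = none then
        (rsyls ++ [[pyRstripChar p m]], some (rsyls.length : Int), sec_r)
      else if m = '2' then
        (rsyls ++ [[pyRstripChar p m]], prim_r, sec_r ++ [(rsyls.length : Int)])
      else
        (rsyls ++ [[pyRstripChar p m]], prim_r, sec_r)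
    | none =>
      match rsyls.getLast? with
      | some lastS => (rsyls.dropLast ++ [lastS ++ [p]], prim_r, sec_r)   -- rsyls[-1].append(p)
      | none => ([[p]], prim_r, sec_r)

def get_stress_pattern_alt (pronunciation : List String) : Option Int × List Int × List (List String) :=
  match pronunciation.reverse.foldl stepB_gsp ([], none, []) with
  | (rsyls, prim_r, sec_r) =>
    ((match prim_r with
      | none => none
      | some k => some ((rsyls.length : Int) - 1 - k)),
     sec_r.reverse.map (fun k => (rsyls.length : Int) - 1 - k),
     rsyls.reverse.map List.reverse)

-- ===== PRECONDITION & SPEC =====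
def Spec_get_stress_pattern (pronunciation : List String) (out : Option Int × List Int × List (List String)) : Prop := out = get_stress_pattern_alt pronunciation
instance (pronunciation : List String) (out : Option Int × List Int × List (List String)) : Decidable (Spec_get_stress_pattern pronunciation out) := by unfold Spec_get_stress_pattern; infer_instance

-- ===== CLAIM (what is proved, stated in full; the proofs are below) =====
def Claim_equal_get_stress_pattern : Prop := ∀ (pronunciation : List String), Dom_get_stress_pattern pronunciation → Spec_get_stress_pattern pronunciation (get_stress_pattern pronunciation)

-- ===== LEMMAS AND PROOFS =====

-- reference recursion both programs are related to: analyse the tail, then either open a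
-- new first syllable at a boundary (shifting the stress indices) or prepend the phoneme
def scanStep (head : String) (r : Option Int × List Int × List (List String)) :
    Option Int × List Int × List (List String) :=
  match r with
  | (prim, sec, syls) =>
    match markB head with
    | some m =>
      ((match prim with
        | some p => some (p + 1)
        | none => if m = '1' then some 0 else none),
       (if m = '2' then [(0 : Int)] else []) ++ sec.map (· + 1),
       [[pyRstripChar head m]] ++ syls)
    | none =>
      match syls with
      | s :: ss => (prim, sec, ([head] ++ s) :: ss)
      | [] => (prim, sec, [[head]])

def scanRec : List String → Option Int × List Int × List (List String)
  | [] => (none, [], [])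
  | head :: rest => scanStep head (scanRec rest)

-- ---- A = scanRec ----

-- cur0 merges into the first syllable (or becomes the only syllable, if nonempty)
def consFirst (c : List String) : List (List String) → List (List String)
  | [] => if c ≠ [] then [c] else []
  | s :: ss => (c ++ s) :: ss

-- A's finishing step, run from an arbitrary loop state
def runA (st : Option Int × List Int × List (List String) × List String)
    (l : List String) : Option Int × List Int × List (List String) :=
  match l.foldl stepA_gsp st with
  | (p, sec, syls, cur) => (p, sec, if cur ≠ [] then syls ++ [cur] else syls)

-- how scanRec's result for the remaining input combines with A's current loop state
def glue (st : Option Int × List Int × List (List String) × List String)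
    (r : Option Int × List Int × List (List String)) : Option Int × List Int × List (List String) :=
  match st, r with
  | (p0, sec0, syls0, cur0), (p, sec, syls) =>
    ((match p with | none => p0 | some k => some (k + (syls0.length : Int))),
     sec0 ++ sec.map (· + (syls0.length : Int)),
     syls0 ++ consFirst cur0 syls)

theorem consFirst_nil (ss : List (List String)) : consFirst [] ss = ss := by
  cases ss <;> simp [consFirst]

theorem singleton_suffix_iff (cs : List Char) (c : Char) :
    [c] <:+ cs ↔ cs.getLast? = some c := by
  induction cs using List.reverseRecOn with
  | nil => simp
  | append_singleton t x _ =>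
    constructor
    · intro h
      rcases h with ⟨pre, hpre⟩
      have : ([c]).getLast? = (t ++ [x]).getLast? := by rw [← hpre]; simp
      simpa using this.symm
    · intro h
      simp at h
      subst h
      exact ⟨t, rfl⟩

theorem endswith_char (s : String) (c : Char) :
    PySem.Str.endswith s (String.ofList [c]) = (s.toList.getLast? == some c) := by
  rcases hb : s.toList.getLast? == some c with _ | _
  · rw [Bool.eq_false_iff]
    intro h
    rw [PySem.Str.endswith_eq, PySem.Chars.endswith_iff] at h
    simp [singleton_suffix_iff] at h
    simp_all
  · rw [PySem.Str.endswith_eq, PySem.Chars.endswith_iff]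
    simp [singleton_suffix_iff]
    simp_all

theorem step_glue (st : Option Int × List Int × List (List String) × List String)
    (x : String) (r : Option Int × List Int × List (List String)) :
    glue (stepA_gsp st x) r = glue st (scanStep x r) := by
  obtain ⟨p0, sec0, syls0, cur0⟩ := st
  obtain ⟨p, sec, syls⟩ := r
  have e1 : PySem.Str.endswith x "1" = (x.toList.getLast? == some '1') := by
    rw [show ("1" : String) = String.ofList ['1'] from rfl, endswith_char]
  have e2 : PySem.Str.endswith x "2" = (x.toList.getLast? == some '2') := by
    rw [show ("2" : String) = String.ofList ['2'] from rfl, endswith_char]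
  have e0 : PySem.Str.endswith x "0" = (x.toList.getLast? == some '0') := by
    rw [show ("0" : String) = String.ofList ['0'] from rfl, endswith_char]
  rcases hlast : x.toList.getLast? with _ | c
  · simp only [stepA_gsp, scanStep, e1, e2, e0, hlast, markB]
    simp only [Option.none_beq_some, Bool.false_eq_true, if_false]
    cases syls <;> simp [glue, consFirst]
  · simp only [stepA_gsp, scanStep, e1, e2, e0, hlast, markB, Option.some_beq_some]
    by_cases hc1 : c = '1'
    · subst hc1
      simp only [beq_self_eq_true, if_true]
      cases p <;> cases syls <;>
        simp [glue, consFirst, add_comm] <;> omega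
    · by_cases hc2 : c = '2'
      · subst hc2
        simp only [show (('2' : Char) == '1') = false from rfl, Bool.false_eq_true, if_false,
          beq_self_eq_true, if_true]
        cases p <;> cases syls <;>
          simp [glue, consFirst, add_comm] <;> omega
      · by_cases hc0 : c = '0'
        · subst hc0
          simp only [show (('0' : Char) == '1') = false from rfl,
            show (('0' : Char) == '2') = false from rfl, Bool.false_eq_true, if_false,
            beq_self_eq_true, if_true]
          cases p <;> cases syls <;>
            simp [glue, consFirst, add_comm] <;> omega
        · have b1 : (c == '1') = false := by simp [hc1]
          have b2 : (c == '2') = false := by simp [hc2]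
          have b0 : (c == '0') = false := by simp [hc0]
          simp only [b1, b2, b0, Bool.false_eq_true, if_false]
          have hm : (if c = '0' ∨ c = '1' ∨ c = '2' then some c else none) = (none : Option Char) := by
            simp [hc0, hc1, hc2]
          rw [hm]
          cases syls <;> simp [glue, consFirst]

theorem runA_glue (l : List String) :
    ∀ st, runA st l = glue st (scanRec l) := by
  induction l with
  | nil =>
    intro st
    obtain ⟨p0, sec0, syls0, cur0⟩ := st
    simp only [runA, List.foldl_nil, scanRec, glue, consFirst]
    split_ifs <;> simp_all
  | cons x l ih =>
    intro st
    have h : runA st (x :: l) = runA (stepA_gsp st x) l := by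
      simp [runA, List.foldl_cons]
    rw [h, ih, step_glue]
    rfl

theorem glue_init (r : Option Int × List Int × List (List String)) :
    glue (none, [], [], []) r = r := by
  obtain ⟨p, sec, syls⟩ := r
  cases p <;> simp [glue, consFirst_nil]

theorem A_eq_scanRec (l : List String) : get_stress_pattern l = scanRec l := by
  have h : get_stress_pattern l = runA (none, [], [], []) l := rfl
  rw [h, runA_glue, glue_init]

-- ---- B = scanRec ----

-- scanRec's result as B's loop state: syllables reversed in both dimensions,
-- stress positions counted from the right
def encodeB (r : Option Int × List Int × List (List String)) :
    List (List String) × Option Int × List Int :=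
  match r with
  | (p, sec, syls) =>
    ((syls.map List.reverse).reverse,
     (match p with
      | none => none
      | some k => some ((syls.length : Int) - 1 - k)),
     (sec.map (fun k => (syls.length : Int) - 1 - k)).reverse)

theorem stepB_encode (x : String) (r : Option Int × List Int × List (List String))
    (hwf : r.2.2 = [] → r.1 = none ∧ r.2.1 = []) :
    stepB_gsp (encodeB r) x = encodeB (scanStep x r) := by
  obtain ⟨p, sec, syls⟩ := r
  rcases hm : markB x with _ | m
  · simp only [stepB_gsp, scanStep, encodeB, hm]
    cases syls with
    | nil =>
      obtain ⟨hp, hs⟩ := hwf rfl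
      subst hp; subst hs
      simp
    | cons s ss => simp
  · simp only [stepB_gsp, scanStep, encodeB, hm]
    by_cases hc1 : m = '1'
    · subst hc1
      cases p <;>
        simp [List.map_map, Function.comp] <;>
        (try constructor) <;>
          first
            | exact fun a _ => by ring
            | ring
    · by_cases hc2 : m = '2'
      · subst hc2
        cases p <;>
          simp [hc1, List.map_map, Function.comp] <;>
          (try constructor) <;>
            first
              | exact fun a _ => by ring
              | ring
      · cases p <;>
          simp [hc1, hc2, List.map_map, Function.comp] <;>
          (try constructor) <;>
            first
              | exact fun a _ => by ring
              | ring

theorem scanRec_wf (l : List String) :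
    (scanRec l).2.2 = [] → (scanRec l).1 = none ∧ (scanRec l).2.1 = [] := by
  cases l with
  | nil => intro _; exact ⟨rfl, rfl⟩
  | cons x t =>
    intro h
    exfalso
    rcases hr : scanRec t with ⟨p, sec, syls⟩
    rcases hm : markB x with _ | m <;>
      [cases syls <;> simp [scanRec, scanStep, hr, hm] at h;
       simp [scanRec, scanStep, hr, hm] at h]

theorem foldB_encode (l : List String) :
    l.reverse.foldl stepB_gsp ([], none, []) = encodeB (scanRec l) := by
  induction l with
  | nil => rfl
  | cons x l ih =>
    have h : (x :: l).reverse = l.reverse ++ [x] := by simp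
    rw [h, List.foldl_append, ih]
    simpa [scanRec] using stepB_encode x (scanRec l) (scanRec_wf l)

theorem decode_encode (r : Option Int × List Int × List (List String)) :
    (match encodeB r with
     | (rsyls, prim_r, sec_r) =>
       ((match prim_r with
         | none => none
         | some k => some ((rsyls.length : Int) - 1 - k)),
        sec_r.reverse.map (fun k => (rsyls.length : Int) - 1 - k),
        rsyls.reverse.map List.reverse)) = r := by
  obtain ⟨p, sec, syls⟩ := r
  cases p <;>
    simp [encodeB, List.map_map]

theorem B_eq_scanRec (l : List String) : get_stress_pattern_alt l = scanRec l := by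
  have h : get_stress_pattern_alt l
      = (match l.reverse.foldl stepB_gsp ([], none, []) with
         | (rsyls, prim_r, sec_r) =>
           ((match prim_r with
             | none => none
             | some k => some ((rsyls.length : Int) - 1 - k)),
            sec_r.reverse.map (fun k => (rsyls.length : Int) - 1 - k),
            rsyls.reverse.map List.reverse)) := rfl
  rw [h, foldB_encode]
  exact decode_encode (scanRec l)

-- ===== VERDICT (by name: the statement is the Claim_ definition above) =====
theorem get_stress_pattern_spec : Claim_equal_get_stress_pattern := by
  intro l _
  show get_stress_pattern l = get_stress_pattern_alt l
  rw [A_eq_scanRec, B_eq_scanRec]
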